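-- pv_equiv track=rewrite | github.com/baebaemin/Solved_Algorithm | 프로그래머스/2/42626. 더 맵게/더 맵게.py | solution
-- ===== SOURCE A (Python) =====
-- import heapq
--
-- def solution(scoville, K):
--     heapq.heapify(scoville)
--     cnt = 0
--
--     while scoville[0] < K:
--         if len(scoville) < 2:
--             return -1
--
--         first = heapq.heappop(scoville)
--         second = heapq.heappop(scoville)
--         newMixed = first + second * 2
--         heapq.heappush(scoville, newMixed)
--
--         cnt += 1
--     return cnt
-- ===== SOURCE B (Python) =====
-- from collections import deque
--
-- def solution(scoville, K):
--     # Two-queue technique: after one initial sort, newly mixed values come out in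
--     # nondecreasing order, so a plain FIFO queue of mixes plus the sorted originals
--     # replaces any priority queue; each step just compares the two queue fronts.
--     # (Does not mutate the argument; A heapifies it in place.)
--     orig = deque(sorted(scoville))
--     mixed = deque()
--     cnt = 0
--     while True:
--         if mixed and (not orig or mixed[0] < orig[0]):
--             smallest = mixed[0]
--         else:
--             smallest = orig[0]
--         if smallest >= K:
--             return cnt
--         if len(orig) + len(mixed) < 2:
--             return -1
--         if mixed and (not orig or mixed[0] < orig[0]):
--             first = mixed.popleft()
--         else:
--             first = orig.popleft()
--         if mixed and (not orig or mixed[0] < orig[0]):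
--             second = mixed.popleft()
--         else:
--             second = orig.popleft()
--         mixed.append(first + 2 * second)
--         cnt += 1
-- ===== Notes on version B (the rewrite author's own statement) =====
-- stated objective: faster
-- what changed: Replaces the heap with the two-queue monotone-merge technique: sort once, then keep newly mixed values in a plain FIFO queue (they are provably produced in nondecreasing order), so each step only compares and pops the two queue fronts in O(1) instead of O(log n) heap sift operations; B also does not mutate the input list, while A heapifies it in place.
-- outside the precondition, e.g. on solution([], 0): A raises IndexError, B raises IndexError
import Mathlib
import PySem

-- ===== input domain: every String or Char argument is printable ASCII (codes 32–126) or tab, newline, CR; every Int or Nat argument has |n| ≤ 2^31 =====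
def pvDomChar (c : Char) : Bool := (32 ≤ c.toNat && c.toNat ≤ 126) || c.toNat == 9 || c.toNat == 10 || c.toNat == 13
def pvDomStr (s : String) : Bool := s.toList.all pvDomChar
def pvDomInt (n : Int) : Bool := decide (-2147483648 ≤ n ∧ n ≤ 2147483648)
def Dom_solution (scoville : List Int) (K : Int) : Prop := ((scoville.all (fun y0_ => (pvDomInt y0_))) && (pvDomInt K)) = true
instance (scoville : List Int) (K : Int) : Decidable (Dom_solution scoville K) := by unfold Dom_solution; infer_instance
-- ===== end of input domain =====

-- B replaces A's heap by the two-queue technique (one initial sort + a FIFO queue of the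
-- mixed values, which are produced in nondecreasing order); equivalence is about the return
-- value only: A heapifies its argument in place, B does not mutate it.

-- ===== PORT A =====
-- A's heap of Ints is modelled as the multiset of its elements: heappop = remove a minimal
-- element (for Int values, WHICH minimal occurrence is removed cannot affect any result),
-- heappush = append.  The while loop runs at most (length - 1) times (each iteration needs
-- ≥ 2 elements and shrinks the heap by one), so fuel = length is never exhausted.
def runA : Nat → List Int → Int → Int → Int
  | 0, _, _, cnt => cnt
  | f + 1, heap, K, cnt =>
    match PySem.List.min? heap (fun y => y) with
    | none => cnt          -- empty heap: Python's scoville[0] raised IndexError; outside Pre_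
    | some m =>
      if m < K then
        if heap.length < 2 then -1
        else
          let h1 := (PySem.List.remove? heap m).getD heap
          match PySem.List.min? h1 (fun y => y) with
          | none => cnt    -- unreachable: h1 has ≥ 1 element here
          | some m2 =>
            let h2 := (PySem.List.remove? h1 m2).getD h1
            runA f (h2 ++ [m + m2 * 2]) K (cnt + 1)
      else cnt

def solution (scoville : List Int) (K : Int) : Int :=
  runA scoville.length scoville K 0

-- ===== PORT B =====
-- Source B's pop: take the front of `mixed` iff mixed is nonempty and (orig is empty or
-- mixed[0] < orig[0]); otherwise the front of orig.  ([] , []) is unreachable (Source B only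
-- pops when the queues hold ≥ 2 elements in total); the (0,[],[]) row merely totalises.
def popQ (orig mixed : List Int) : Int × List Int × List Int :=
  match orig, mixed with
  | [], [] => (0, [], [])
  | [], m :: ms => (m, [], ms)
  | o :: os, [] => (o, os, [])
  | o :: os, m :: ms => if m < o then (m, o :: os, ms) else (o, os, m :: ms)

-- Source B's `smallest`: the smaller front (orig[0] on ties); none = IndexError on empty input
def peekQ (orig mixed : List Int) : Option Int :=
  match orig, mixed with
  | [], [] => none
  | [], m :: _ => some m
  | o :: _, [] => some o
  | o :: _, m :: _ => some (if m < o then m else o)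

-- Source B's while loop on the two queues; fuel = initial length is never exhausted (each
-- iteration removes two elements and appends one, and needs ≥ 2 elements to run).
def runQ : Nat → List Int → List Int → Int → Int → Int
  | 0, _, _, _, cnt => cnt
  | f + 1, orig, mixed, K, cnt =>
    match peekQ orig mixed with
    | none => cnt          -- empty input: Python raised IndexError; outside Pre_
    | some smallest =>
      if K ≤ smallest then cnt
      else if orig.length + mixed.length < 2 then -1
      else
        let p1 := popQ orig mixed
        let p2 := popQ p1.2.1 p1.2.2
        runQ f p2.2.1 (p2.2.2 ++ [p1.1 + 2 * p2.1]) K (cnt + 1)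

def solution_alt (scoville : List Int) (K : Int) : Int :=
  runQ scoville.length (PySem.List.sorted scoville (fun y => y) false) [] K 0

-- ===== PRECONDITION & SPEC =====
-- Pre_ excludes only the empty list, on which Python A raises IndexError (scoville[0]).
def Pre_solution (scoville : List Int) (K : Int) : Prop := scoville ≠ []
instance (scoville : List Int) (K : Int) : Decidable (Pre_solution scoville K) := by unfold Pre_solution; infer_instance
def pvWitness_solution : List Int × Int := ([1, 2, 3, 9, 10, 12], 7)

def Spec_solution (scoville : List Int) (K : Int) (out : Int) : Prop := out = solution_alt scoville K
instance (scoville : List Int) (K : Int) (out : Int) : Decidable (Spec_solution scoville K out) := by unfold Spec_solution; infer_instance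

-- ===== CLAIM (what is proved, stated in full; the proofs are below) =====
def Claim_equal_solution : Prop := ∀ (scoville : List Int) (K : Int), Dom_solution scoville K → Pre_solution scoville K → Spec_solution scoville K (solution scoville K)

-- ===== LEMMAS AND PROOFS =====

-- ordered insertion (after equal elements), proof-side model of the combined pool
def insortB (x : Int) : List Int → List Int
  | [] => [x]
  | y :: ys => if x < y then x :: y :: ys else y :: insortB x ys

-- proof-side intermediate: the greedy loop on ONE sorted pool list
def runS : Nat → List Int → Int → Int → Int
  | 0, _, _, cnt => cnt
  | f + 1, s, K, cnt =>
    match s with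
    | [] => cnt
    | x :: t =>
      if x < K then
        match t with
        | [] => -1
        | y :: r => runS f (insortB (x + 2 * y) r) K (cnt + 1)
      else cnt

-- the merge (ties to the left) of the two queues = the sorted pool
def mergeQ : List Int → List Int → List Int
  | [], m => m
  | o :: os, [] => o :: os
  | o :: os, m :: ms => if m < o then m :: mergeQ (o :: os) ms else o :: mergeQ os (m :: ms)
termination_by a b => a.length + b.length

lemma mergeQ_nil_right (o : List Int) : mergeQ o [] = o := by
  cases o <;> simp [mergeQ]

lemma mergeQ_nil_left (m : List Int) : mergeQ [] m = m := by rw [mergeQ]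

lemma mergeQ_perm (o m : List Int) : (mergeQ o m).Perm (o ++ m) := by
  induction o, m using mergeQ.induct with
  | case1 m => simp [mergeQ_nil_left]
  | case2 o os => simp [mergeQ]
  | case3 o os m ms hlt ih =>
    rw [mergeQ, if_pos hlt]
    exact (ih.cons m).trans List.perm_middle.symm
  | case4 o os m ms hlt ih =>
    rw [mergeQ, if_neg hlt]
    exact ih.cons o

lemma mergeQ_sorted (o m : List Int) (ho : o.Pairwise (· ≤ ·)) (hm : m.Pairwise (· ≤ ·)) :
    (mergeQ o m).Pairwise (· ≤ ·) := by
  induction o, m using mergeQ.induct with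
  | case1 m => simpa [mergeQ_nil_left] using hm
  | case2 o os => simpa [mergeQ_nil_right] using ho
  | case3 o os m ms hlt ih =>
    rw [mergeQ, if_pos hlt]
    refine List.pairwise_cons.mpr ⟨?_, ih ho (List.pairwise_cons.mp hm).2⟩
    intro b hb
    have hb' : b ∈ (o :: os) ++ ms := (mergeQ_perm _ _).mem_iff.mp hb
    rcases List.mem_append.mp hb' with hb' | hb'
    · rcases List.mem_cons.mp hb' with rfl | hb'
      · omega
      · have := (List.pairwise_cons.mp ho).1 b hb'; omega
    · exact (List.pairwise_cons.mp hm).1 b hb'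
  | case4 o os m ms hlt ih =>
    rw [mergeQ, if_neg hlt]
    refine List.pairwise_cons.mpr ⟨?_, ih (List.pairwise_cons.mp ho).2 hm⟩
    intro b hb
    have hb' : b ∈ os ++ m :: ms := (mergeQ_perm _ _).mem_iff.mp hb
    rcases List.mem_append.mp hb' with hb' | hb'
    · exact (List.pairwise_cons.mp ho).1 b hb'
    · rcases List.mem_cons.mp hb' with rfl | hb'
      · omega
      · have := (List.pairwise_cons.mp hm).1 b hb'; omega

lemma peekQ_eq_head (o m : List Int) : peekQ o m = (mergeQ o m).head? := by
  cases o with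
  | nil => cases m <;> simp [peekQ, mergeQ_nil_left]
  | cons o os =>
    cases m with
    | nil => simp [peekQ, mergeQ_nil_right]
    | cons x ms =>
      simp only [peekQ, mergeQ]
      split <;> simp_all

-- one pop takes exactly the head of the merged pool; the survivors merge to its tail
lemma popQ_spec (o m : List Int) (x : Int) (t : List Int) (h : mergeQ o m = x :: t) :
    (popQ o m).1 = x ∧ mergeQ (popQ o m).2.1 (popQ o m).2.2 = t ∧
    ((popQ o m).2.1 = o ∨ (popQ o m).2.1 = o.tail) ∧
    ((popQ o m).2.2 = m ∨ (popQ o m).2.2 = m.tail) := by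
  cases o with
  | nil =>
    cases m with
    | nil => simp [mergeQ] at h
    | cons a ms =>
      rw [mergeQ_nil_left] at h
      cases h
      simp [popQ, mergeQ_nil_left]
  | cons a os =>
    cases m with
    | nil =>
      rw [mergeQ_nil_right] at h
      cases h
      simp [popQ, mergeQ_nil_right]
    | cons b ms =>
      simp only [mergeQ] at h
      by_cases hlt : b < a
      · rw [if_pos hlt] at h
        cases h
        simp [popQ, if_pos hlt]
      · rw [if_neg hlt] at h
        cases h
        simp [popQ, if_neg hlt]

lemma sorted_eq_of_perm (l₁ l₂ : List Int) (hp : l₁.Perm l₂)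
    (h₁ : l₁.Pairwise (· ≤ ·)) (h₂ : l₂.Pairwise (· ≤ ·)) : l₁ = l₂ :=
  List.Perm.eq_of_pairwise' h₁ h₂ hp

lemma insortB_perm (x : Int) (l : List Int) : (insortB x l).Perm (x :: l) := by
  induction l with
  | nil => simp [insortB]
  | cons y ys ih =>
    simp only [insortB]
    split
    · exact List.Perm.refl _
    · exact (ih.cons y).trans (List.Perm.swap x y ys)

lemma mem_insortB (z x : Int) (l : List Int) (h : z ∈ insortB x l) : z = x ∨ z ∈ l :=
  List.mem_cons.mp ((insortB_perm x l).mem_iff.mp h)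

lemma insortB_pairwise (x : Int) (l : List Int) (h : l.Pairwise (· ≤ ·)) :
    (insortB x l).Pairwise (· ≤ ·) := by
  induction l with
  | nil => simp [insortB]
  | cons y ys ih =>
    rcases List.pairwise_cons.mp h with ⟨hy, hys⟩
    simp only [insortB]
    split
    · rename_i hlt
      refine List.pairwise_cons.mpr ⟨?_, h⟩
      intro b hb
      rcases List.mem_cons.mp hb with rfl | hb
      · omega
      · have := hy b hb; omega
    · rename_i hnlt
      refine List.pairwise_cons.mpr ⟨?_, ih hys⟩
      intro b hb
      rcases mem_insortB b x ys hb with rfl | hb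
      · omega
      · exact hy b hb

lemma pairwise_erase (l : List Int) (a : Int) (h : l.Pairwise (· ≤ ·)) :
    (l.erase a).Pairwise (· ≤ ·) :=
  h.sublist (List.erase_sublist)

-- q is bounded by (first) + 2*(second) of the pool with q's own occurrence removed
def bnd (q : Int) : List Int → Prop
  | a :: b :: _ => q ≤ a + 2 * b
  | _ => True

lemma head_le_of_mem (r0 : Int) (rs : List Int) (q : Int)
    (h : (r0 :: rs).Pairwise (· ≤ ·)) (hq : q ∈ r0 :: rs) : r0 ≤ q := by
  rcases List.mem_cons.mp hq with rfl | hq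
  · omega
  · exact (List.pairwise_cons.mp h).1 q hq

-- a mixed element that survives the two pops is ≤ first + 2*second of the pool
lemma survivorBound (a b : Int) (rest : List Int) (q : Int)
    (hs : (a :: b :: rest).Pairwise (· ≤ ·)) (hq : q ∈ rest)
    (hb : bnd q ((a :: b :: rest).erase q)) : q ≤ a + 2 * b := by
  have hab : a ≤ b := (List.pairwise_cons.mp hs).1 b (by simp)
  have hbq : b ≤ q := (List.pairwise_cons.mp (List.pairwise_cons.mp hs).2).1 q hq
  cases rest with
  | nil => simp at hq
  | cons r0 rs =>
    have hr0q : r0 ≤ q :=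
      head_le_of_mem r0 rs q (List.pairwise_cons.mp (List.pairwise_cons.mp hs).2).2 hq
    have hbr0 : b ≤ r0 := (List.pairwise_cons.mp (List.pairwise_cons.mp hs).2).1 r0 (by simp)
    by_cases haq : a = q
    · -- erase removes the head a (= q); then b = q and r0 = q
      have : ((a :: b :: r0 :: rs).erase q) = b :: r0 :: rs := by
        rw [List.erase_cons, if_pos (by simp [haq])]
      rw [this] at hb
      simp only [bnd] at hb
      omega
    · by_cases hbq' : b = q
      · have : ((a :: b :: r0 :: rs).erase q) = a :: r0 :: rs := by
          rw [List.erase_cons, if_neg (by simp [haq]), List.erase_cons, if_pos (by simp [hbq'])]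
        rw [this] at hb
        simp only [bnd] at hb
        omega
      · have : ((a :: b :: r0 :: rs).erase q) = a :: b :: ((r0 :: rs).erase q) := by
          rw [List.erase_cons, if_neg (by simp [haq]), List.erase_cons, if_neg (by simp [hbq'])]
        rw [this] at hb
        simp only [bnd] at hb
        omega

-- re-established bound for a surviving mixed element after the new mix is inserted
lemma bnd_insort (q a b : Int) (t : List Int)
    (ht : ∀ y ∈ t, b ≤ y) (h12 : a ≤ b) (hqm : b ≤ q) (hqb : q ≤ a + 2 * b) :
    bnd q (insortB (a + 2 * b) t) := by
  have hb0 : 0 ≤ b := by omega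
  cases t with
  | nil => simp [insortB, bnd]
  | cons c t' =>
    have hc : b ≤ c := ht c (by simp)
    simp only [insortB]
    split
    · simp only [bnd]; omega
    · cases t' with
      | nil => simp only [insortB, bnd]; omega
      | cons d t'' =>
        have hd : b ≤ d := ht d (by simp)
        simp only [insortB]
        split
        · simp only [bnd]; omega
        · simp only [bnd]; omega

-- the bound for the freshly mixed value itself
lemma bnd_new (a b : Int) (rest : List Int) (hs : (a :: b :: rest).Pairwise (· ≤ ·)) :
    bnd (a + 2 * b) rest := by
  cases rest with
  | nil => simp [bnd]
  | cons c t =>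
    cases t with
    | nil => simp [bnd]
    | cons d t' =>
      have hab : a ≤ b := (List.pairwise_cons.mp hs).1 b (by simp)
      have hbc : b ≤ c := (List.pairwise_cons.mp (List.pairwise_cons.mp hs).2).1 c (by simp)
      have hbd : b ≤ d := (List.pairwise_cons.mp (List.pairwise_cons.mp hs).2).1 d (by simp)
      simp only [bnd]
      omega

-- the two-queue loop equals the sorted-pool loop under the invariant
lemma runS_eq_runQ : ∀ (f : Nat) (o m : List Int) (K cnt : Int),
    o.Pairwise (· ≤ ·) → m.Pairwise (· ≤ ·) →
    (∀ q ∈ m, bnd q ((mergeQ o m).erase q)) →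
    runS f (mergeQ o m) K cnt = runQ f o m K cnt := by
  intro f
  induction f with
  | zero => intro o m K cnt _ _ _; rfl
  | succ f ih =>
    intro o m K cnt ho hm hinv
    have hsorted : (mergeQ o m).Pairwise (· ≤ ·) := mergeQ_sorted o m ho hm
    have hlen : (mergeQ o m).length = o.length + m.length := by
      have := (mergeQ_perm o m).length_eq
      simpa using this
    cases hs0 : mergeQ o m with
    | nil =>
      have hpeek : peekQ o m = none := by rw [peekQ_eq_head, hs0]; rfl
      simp [runS, runQ, hpeek]
    | cons x t =>
      have hpeek : peekQ o m = some x := by rw [peekQ_eq_head, hs0]; rfl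
      rw [hs0] at hsorted hlen
      by_cases hxK : x < K
      · cases t with
        | nil =>
          have hl2 : o.length + m.length < 2 := by simp at hlen; omega
          simp [runS, runQ, hpeek, hxK, hl2, Int.not_le.mpr hxK]
        | cons y r =>
          have hl2 : ¬ (o.length + m.length < 2) := by simp at hlen; omega
          -- the two pops
          obtain ⟨hp1x, hp1m, hp1o', hp1m'⟩ := popQ_spec o m x (y :: r) hs0
          have ho1 : (popQ o m).2.1.Pairwise (· ≤ ·) := by
            rcases hp1o' with h | h <;> rw [h]
            · exact ho
            · exact ho.sublist (List.tail_sublist o)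
          have hm1 : (popQ o m).2.2.Pairwise (· ≤ ·) := by
            rcases hp1m' with h | h <;> rw [h]
            · exact hm
            · exact hm.sublist (List.tail_sublist m)
          obtain ⟨hp2y, hp2m, hp2o', hp2m'⟩ :=
            popQ_spec (popQ o m).2.1 (popQ o m).2.2 y r hp1m
          have ho2 : (popQ (popQ o m).2.1 (popQ o m).2.2).2.1.Pairwise (· ≤ ·) := by
            rcases hp2o' with h | h <;> rw [h]
            · exact ho1
            · exact ho1.sublist (List.tail_sublist _)
          have hm2 : (popQ (popQ o m).2.1 (popQ o m).2.2).2.2.Pairwise (· ≤ ·) := by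
            rcases hp2m' with h | h <;> rw [h]
            · exact hm1
            · exact hm1.sublist (List.tail_sublist _)
          set o2 := (popQ (popQ o m).2.1 (popQ o m).2.2).2.1 with ho2def
          set m2 := (popQ (popQ o m).2.1 (popQ o m).2.2).2.2 with hm2def
          -- survivors are elements of m and of r
          have hm2subm : ∀ q ∈ m2, q ∈ m := by
            intro q hq
            have h1 : q ∈ (popQ o m).2.2 := by
              rcases hp2m' with h | h
              · rwa [← h]
              · rw [h] at hq; exact List.mem_of_mem_tail hq
            rcases hp1m' with h | h
            · rwa [← h]
            · rw [h] at h1; exact List.mem_of_mem_tail h1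
          have hm2subr : ∀ q ∈ m2, q ∈ r := by
            intro q hq
            have h1 : q ∈ mergeQ o2 m2 :=
              (mergeQ_perm o2 m2).symm.subset (List.mem_append_right o2 hq)
            rwa [hp2m] at h1
          -- the survivor bound
          have hsurv : ∀ q ∈ m2, q ≤ x + 2 * y := by
            intro q hq
            exact survivorBound x y r q hsorted (hm2subr q hq)
              (by rw [← hs0]; exact hinv q (hm2subm q hq))
          set n := x + 2 * y with hndef
          -- sortedness of the new mixed queue
          have hr_sorted : r.Pairwise (· ≤ ·) :=
            (List.pairwise_cons.mp (List.pairwise_cons.mp hsorted).2).2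
          have hmix' : (m2 ++ [n]).Pairwise (· ≤ ·) := by
            refine List.pairwise_append.mpr ⟨hm2, by simp, ?_⟩
            intro a ha b hb
            simp at hb
            subst hb
            exact hsurv a ha
          -- the merged new pool equals the insort
          have hrest_ge : ∀ z ∈ r, y ≤ z := by
            intro z hz
            exact (List.pairwise_cons.mp (List.pairwise_cons.mp hsorted).2).1 z hz
          have hperm_om : (o2 ++ m2).Perm r := by
            rw [← hp2m]
            exact (mergeQ_perm o2 m2).symm
          have hmergeNew : mergeQ o2 (m2 ++ [n]) = insortB n r := by
            apply sorted_eq_of_perm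
            · refine (mergeQ_perm _ _).trans ?_
              rw [← List.append_assoc]
              exact (hperm_om.append_right [n]).trans
                ((List.perm_append_singleton n r).trans (insortB_perm n r).symm)
            · exact mergeQ_sorted _ _ ho2 hmix'
            · exact insortB_pairwise n r hr_sorted
          -- the new invariant
          have hinv' : ∀ q ∈ m2 ++ [n], bnd q ((mergeQ o2 (m2 ++ [n])).erase q) := by
            rw [hmergeNew]
            intro q hq
            rcases List.mem_append.mp hq with hq | hq
            · -- surviving mixed element
              have hqr : q ∈ r := hm2subr q hq
              have herase : (insortB n r).erase q = insortB n (r.erase q) := by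
                apply sorted_eq_of_perm
                · refine ((insortB_perm n r).erase q).trans ?_
                  by_cases hqn : n = q
                  · subst hqn
                    rw [List.erase_cons_head]
                    exact (List.perm_cons_erase hqr).trans (insortB_perm _ _).symm
                  · rw [List.erase_cons, if_neg (by simp [hqn])]
                    exact (insortB_perm n (r.erase q)).symm
                · exact pairwise_erase _ q (insortB_pairwise n r hr_sorted)
                · exact insortB_pairwise n _ (pairwise_erase r q hr_sorted)
              rw [herase]
              refine bnd_insort q x y (r.erase q) ?_ ?_ ?_ (hsurv q hq)
              · intro z hz
                exact hrest_ge z (List.mem_of_mem_erase hz)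
              · exact (List.pairwise_cons.mp hsorted).1 y (by simp)
              · exact hrest_ge q hqr
            · -- the freshly mixed value
              simp at hq
              subst hq
              have herase : (insortB n r).erase n = r := by
                apply sorted_eq_of_perm
                · exact ((insortB_perm n r).erase n).trans (by rw [List.erase_cons_head])
                · exact pairwise_erase _ n (insortB_pairwise n r hr_sorted)
                · exact hr_sorted
              rw [herase]
              exact bnd_new x y r hsorted
          -- assemble the step
          have hrunS : runS (f + 1) (x :: y :: r) K cnt =
              runS f (insortB n r) K (cnt + 1) := by
            simp only [runS, if_pos hxK]
            rw [hndef]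
          have hrunQ : runQ (f + 1) o m K cnt =
              runQ f o2 (m2 ++ [n]) K (cnt + 1) := by
            simp only [runQ, hpeek]
            rw [if_neg (Int.not_le.mpr hxK), if_neg hl2, hp1x, hp2y, hndef]
          rw [hrunS, hrunQ, ← hmergeNew]
          exact ih o2 (m2 ++ [n]) K (cnt + 1) ho2 hmix' hinv'
      · have hKx : K ≤ x := by omega
        simp [runS, runQ, hpeek, hxK, hKx]

-- the head of a sorted list is what min? finds on any permutation of it
lemma min?_of_perm_sorted (x : Int) (rest heap : List Int)
    (hp : (x :: rest).Perm heap) (hs : (x :: rest).Pairwise (· ≤ ·)) :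
    PySem.List.min? heap (fun y => y) = some x := by
  cases hmin : PySem.List.min? heap (fun y => y) with
  | none =>
    have : heap = [] := (PySem.List.min?_eq_none_iff heap (fun y => y)).mp hmin
    subst this
    exact absurd hp.eq_nil (by simp)
  | some m =>
    have hm_mem : m ∈ heap := PySem.List.min?_mem hmin
    have hx_mem : x ∈ heap := hp.mem_iff.mp (by simp)
    have h1 : (fun y => y) m ≤ (fun y => y) x := PySem.List.min?_isMin hmin x hx_mem
    have hm_lst : m ∈ x :: rest := hp.mem_iff.mpr hm_mem
    have h2 : x ≤ m := by
      rcases List.mem_cons.mp hm_lst with h | h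
      · omega
      · exact (List.pairwise_cons.mp hs).1 m h
    exact congrArg some (le_antisymm h1 h2)

-- the heap loop of A equals the sorted-pool loop
lemma runA_eq_runS : ∀ (f : Nat) (s heap : List Int) (K cnt : Int),
    s.Perm heap → s.Pairwise (· ≤ ·) →
    runA f heap K cnt = runS f s K cnt := by
  intro f
  induction f with
  | zero => intro s heap K cnt _ _; rfl
  | succ f ih =>
    intro s heap K cnt hp hs
    cases s with
    | nil =>
      have : heap = [] := hp.symm.eq_nil
      subst this
      have h0 : PySem.List.min? ([] : List Int) (fun y => y) = none :=
        (PySem.List.min?_eq_none_iff _ _).mpr rfl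
      simp [runA, runS, h0]
    | cons x t =>
      have hmin := min?_of_perm_sorted x t heap hp hs
      cases t with
      | nil =>
        have hlen1 : heap.length = 1 := by simpa using hp.length_eq.symm
        simp only [runA, runS, hmin, hlen1]
        split
        · simp
        · rfl
      | cons y rest =>
        have hlen : heap.length = rest.length + 2 := by simpa using hp.length_eq.symm
        have hx_mem : x ∈ heap := hp.mem_iff.mp (by simp)
        have hrm1 : PySem.List.remove? heap x = some (heap.erase x) :=
          PySem.List.remove?_eq_some_erase heap x hx_mem
        have hp1 : (y :: rest).Perm (heap.erase x) := by
          have := hp.erase x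
          simpa using this
        have hs1 : (y :: rest).Pairwise (· ≤ ·) := (List.pairwise_cons.mp hs).2
        have hmin2 := min?_of_perm_sorted y rest (heap.erase x) hp1 hs1
        have hy_mem : y ∈ heap.erase x := hp1.mem_iff.mp (by simp)
        have hrm2 : PySem.List.remove? (heap.erase x) y = some ((heap.erase x).erase y) :=
          PySem.List.remove?_eq_some_erase (heap.erase x) y hy_mem
        have hp2 : rest.Perm ((heap.erase x).erase y) := by
          have := hp1.erase y
          simpa using this
        simp only [runA, runS, hmin, hmin2, hrm1, hrm2, Option.getD_some, hlen]
        by_cases hxK : x < K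
        · have hbig : ¬ (rest.length + 2 < 2) := by omega
          simp only [if_pos hxK, if_neg hbig]
          apply ih
          · have h2y : x + y * 2 = x + 2 * y := by ring
            rw [h2y]
            exact (insortB_perm _ _).trans
              ((List.perm_append_singleton _ _).symm.trans (hp2.append_right _))
          · exact insortB_pairwise _ _ (List.pairwise_cons.mp hs1).2
        · simp only [if_neg hxK]

-- ===== VERDICT (by name: the statement is the Claim_ definition above) =====
theorem solution_spec : Claim_equal_solution := by
  intro scoville K _ _
  unfold Spec_solution solution solution_alt
  refine (runA_eq_runS scoville.length (PySem.List.sorted scoville (fun y => y) false)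
      scoville K 0
      (by simpa using PySem.List.sorted_perm scoville (fun y => y) false)
      (by simpa using PySem.List.sorted_pairwise scoville (fun y => y))).trans ?_
  have h2 := runS_eq_runQ scoville.length (PySem.List.sorted scoville (fun y => y) false) [] K 0
    (by simpa using PySem.List.sorted_pairwise scoville (fun y => y)) (by simp)
    (by simp)
  rwa [mergeQ_nil_right] at h2
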